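-- pv_equiv track=rewrite | github.com/ctir006/Hello-World- | Class_Work_Assignments/HW-4/nbest.py | nbesta
-- ===== SOURCE A (Python) =====
-- def nbesta(a,b):
-- 	pairs=[]
-- 	res=[]
-- 	temp=[]
-- 	for i in a:
-- 		for j in b:
-- 			pairs.append((i+j,(i,j)))
-- 	pairs.sort()
-- 	for i in range(len(a)):
-- 		pos=len(temp)
-- 		for j in range(1,len(temp)+1):
-- 			if temp[-j][0]==pairs[i][0]:
-- 				if temp[-j][1][1]>pairs[i][1][1]:
-- 					pos=-j
-- 			else:
-- 				break
-- 		if pos==len(temp):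
-- 			temp.append(pairs[i])
-- 			res.append(pairs[i][1])
-- 		else:
-- 			temp.insert(pos,pairs[i])
-- 			res.insert(pos,pairs[i][1])
-- 	return res
-- ===== SOURCE B (Python) =====
-- import heapq
--
-- def nbesta(a, b):
--     n = len(a)
--     best = heapq.nsmallest(n, ((i + j, i, j) for i in a for j in b))
--     best.sort(key=lambda t: (t[0], t[2]))
--     return [(i, j) for _, i, j in best]
-- ===== Notes on version B (the rewrite author's own statement) =====
-- stated objective: faster
-- what changed: B replaces A's full sort of all n*m (sum,(i,j)) pairs plus its quadratic backward-scan-and-insert reordering loop by heapq.nsmallest(n) over the pair sums followed by a single stable re-sort of those n triples by (sum, j), which realises exactly A's equal-sum reordering.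
import Mathlib
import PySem

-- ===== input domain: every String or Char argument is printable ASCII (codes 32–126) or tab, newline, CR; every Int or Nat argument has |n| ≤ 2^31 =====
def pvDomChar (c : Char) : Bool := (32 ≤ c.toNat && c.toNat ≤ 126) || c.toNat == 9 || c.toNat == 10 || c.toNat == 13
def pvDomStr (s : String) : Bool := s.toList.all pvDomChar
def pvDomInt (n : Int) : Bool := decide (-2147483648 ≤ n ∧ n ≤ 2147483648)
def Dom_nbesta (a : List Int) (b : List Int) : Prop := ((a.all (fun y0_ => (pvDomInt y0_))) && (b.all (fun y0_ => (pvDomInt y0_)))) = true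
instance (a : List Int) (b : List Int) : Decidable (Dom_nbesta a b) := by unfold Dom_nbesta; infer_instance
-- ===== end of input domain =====

-- B replaces A's full sort of all n*m pair sums plus its quadratic scan-and-insert loop by
-- heapq.nsmallest of the n smallest (sum, i, j) triples followed by one re-sort of those n
-- triples by (sum, j); objective: faster (measured).  Neither version mutates its arguments.

-- ===== PORT A =====
-- Python compares tuples lexicographically: the keyless 'pairs.sort()' is ported as the stable
-- PySem sort with the lexicographic key 'pvKey3' on the nested tuple (s, (i, j)).
def pvKey3 (t : Int × Int × Int) : Lex (Int × Lex (Int × Int)) := toLex (t.1, toLex (t.2.1, t.2.2))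

-- the inner 'for j in range(1, len(temp)+1): … else: break' scan over temp from its end
def nbestaScan (rev : List (Int × Int × Int)) (x : Int × Int × Int) (j : Nat) (pos : Int) : Int :=
  match rev with
  | [] => pos
  | t :: ts =>
      if t.1 = x.1 then
        nbestaScan ts x (j + 1) (if x.2.2 < t.2.2 then -(j : Int) else pos)
      else pos

-- one iteration of A's outer loop, state = (temp, res)
def nbestaStep (tr : List (Int × Int × Int) × List (Int × Int)) (p : Int × Int × Int) :
    List (Int × Int × Int) × List (Int × Int) :=
  let pos : Int := nbestaScan tr.1.reverse p 1 (tr.1.length : Int)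
  if pos = (tr.1.length : Int) then (tr.1 ++ [p], tr.2 ++ [p.2])
  else (PySem.List.insert tr.1 pos p, PySem.List.insert tr.2 pos p.2)

def nbesta (a : List Int) (b : List Int) : List (Int × Int) :=
  let pairs := a.foldl (fun ps i => b.foldl (fun ps j => ps ++ [(i + j, (i, j))]) ps) []
  let sp := PySem.List.sorted pairs pvKey3 false
  ((PySem.List.pyRange 0 (a.length : Int) 1).foldl
    (fun tr i => nbestaStep tr (PySem.List.pyGetD sp i (0, (0, 0)))) ([], [])).2

-- ===== PORT B =====
def nbesta_alt (a : List Int) (b : List Int) : List (Int × Int) :=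
  let n := a.length
  -- heapq.nsmallest(n, it) = the first n elements of the sorted sequence
  let best := (PySem.List.sorted (a.flatMap (fun i => b.map (fun j => (i + j, (i, j))))) pvKey3 false).take n
  let fin := PySem.List.sorted2 best (fun t => t.1) (fun t => t.2.2) false
  fin.map (fun t => (t.2.1, t.2.2))

-- ===== PRECONDITION & SPEC =====
-- A raises IndexError when a ≠ [] and b = [] (pairs is empty but the outer loop indexes pairs[i]).
def Pre_nbesta (a : List Int) (b : List Int) : Prop := a = [] ∨ b ≠ []
instance (a : List Int) (b : List Int) : Decidable (Pre_nbesta a b) := by unfold Pre_nbesta; infer_instance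
def pvWitness_nbesta : List Int × List Int := ([1, 2], [3])

def Spec_nbesta (a : List Int) (b : List Int) (out : List (Int × Int)) : Prop := out = nbesta_alt a b
instance (a : List Int) (b : List Int) (out : List (Int × Int)) : Decidable (Spec_nbesta a b out) := by unfold Spec_nbesta; infer_instance

-- ===== CLAIM (what is proved, stated in full; the proofs are below) =====
def Claim_equal_nbesta : Prop := ∀ (a : List Int) (b : List Int), Dom_nbesta a b → Pre_nbesta a b → Spec_nbesta a b (nbesta a b)

-- ===== LEMMAS AND PROOFS =====
-- the secondary key (sum, j): B's final sort; also the order A's scan-and-insert loop realises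
def pvKey2 (t : Int × Int × Int) : Lex (Int × Int) := toLex (t.1, t.2.2)

theorem pv_before2 (u v : Int × Int × Int) :
    (decide (u.1 < v.1) || (!decide (v.1 < u.1) && decide (u.2.2 < v.2.2))) = decide (pvKey2 u < pvKey2 v) := by
  by_cases h1 : u.1 < v.1 <;> by_cases h2 : v.1 < u.1 <;> by_cases h3 : u.2.2 < v.2.2 <;>
    simp [pvKey2, Prod.Lex.toLex_lt_toLex, h1, h2, h3] <;> omega

theorem pv_sorted2_eq (ys : List (Int × Int × Int)) :
    PySem.List.sorted2 ys (fun t => t.1) (fun t => t.2.2) false = PySem.List.sorted ys pvKey2 false := by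
  have hb : (fun (a b : Int × Int × Int) => decide (a.1 < b.1) || (!decide (b.1 < a.1) && decide (a.2.2 < b.2.2))) =
      fun a b : Int × Int × Int => decide (pvKey2 a < pvKey2 b) := by
    funext a b; exact pv_before2 a b
  show List.foldl (fun acc x => PySem.List.insertBy
      (fun a b : Int × Int × Int => decide (a.1 < b.1) || (!decide (b.1 < a.1) && decide (a.2.2 < b.2.2))) x acc) [] ys =
    List.foldl (fun acc x => PySem.List.insertBy
      (fun a b : Int × Int × Int => decide (pvKey2 a < pvKey2 b)) x acc) [] ys
  rw [hb]

theorem pv_insertBy_eq {α : Type} (before : α → α → Bool) (x : α) (ys : List α) :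
    PySem.List.insertBy before x ys =
      ys.takeWhile (fun y => !before x y) ++ x :: ys.dropWhile (fun y => !before x y) := by
  induction ys with
  | nil => rfl
  | cons y ys ih =>
    by_cases h : before x y
    · simp [PySem.List.insertBy, h]
    · simp [PySem.List.insertBy, h, ih]

theorem pv_insert_neg {α : Type} (xs : List α) (c : Nat) (v : α) (hc : 0 < c) (hlen : c ≤ xs.length) :
    PySem.List.insert xs (-(c : Int)) v = xs.take (xs.length - c) ++ v :: xs.drop (xs.length - c) := by
  have hs : PySem.List.sliceIndices xs.length (some (-(c : Int))) none 1 =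
      (((xs.length - c : Nat) : Int), (xs.length : Int), 1) := by
    simp only [PySem.List.sliceIndices]
    norm_num
    omega
  simp [PySem.List.insert, hs]

theorem pv_key3_le_sum (t x : Int × Int × Int) (h : pvKey3 t ≤ pvKey3 x) : t.1 ≤ x.1 := by
  rw [pvKey3, pvKey3, Prod.Lex.toLex_le_toLex] at h
  rcases h with h | ⟨h, -⟩ <;> omega

theorem pv_scan_spec (x : Int × Int × Int) (rev : List (Int × Int × Int)) :
    ∀ (j0 : Nat) (pos0 : Int),
    (∀ t ∈ rev, t.1 ≤ x.1) →
    rev.Pairwise (fun u v => pvKey2 v ≤ pvKey2 u) →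
    nbestaScan rev x (j0 + 1) pos0 =
      if (rev.takeWhile (fun t => decide (pvKey2 x < pvKey2 t))).length = 0 then pos0
      else -((j0 : Int) + ((rev.takeWhile (fun t => decide (pvKey2 x < pvKey2 t))).length : Int)) := by
  induction rev with
  | nil => intro j0 pos0 _ _; simp [nbestaScan]
  | cons t ts ih =>
    intro j0 pos0 hsum hdesc
    rw [List.pairwise_cons] at hdesc
    have hts : t.1 ≤ x.1 := hsum t (by simp)
    by_cases ht : t.1 = x.1
    · by_cases hx : x.2.2 < t.2.2
      · have hP : (pvKey2 x < pvKey2 t) := by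
          rw [pvKey2, pvKey2, Prod.Lex.toLex_lt_toLex]; right; exact ⟨by omega, hx⟩
        have htwc : (t :: ts).takeWhile (fun t => decide (pvKey2 x < pvKey2 t)) =
            t :: ts.takeWhile (fun t => decide (pvKey2 x < pvKey2 t)) := by
          simp [hP]
        rw [htwc, List.length_cons]
        simp only [nbestaScan]
        rw [if_pos ht, if_pos hx]
        rw [ih (j0 + 1) _ (fun u hu => hsum u (by simp [hu])) hdesc.2]
        rw [if_neg (by omega : ¬((ts.takeWhile (fun t => decide (pvKey2 x < pvKey2 t))).length + 1 = 0))]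
        split_ifs with h0 <;> push_cast <;> omega
      · have hPf : ¬(pvKey2 x < pvKey2 t) := by
          rw [pvKey2, pvKey2, Prod.Lex.toLex_lt_toLex]; omega
        have htwc : (t :: ts).takeWhile (fun t => decide (pvKey2 x < pvKey2 t)) = [] := by
          simp [hPf]
        have htwts : ts.takeWhile (fun t => decide (pvKey2 x < pvKey2 t)) = [] := by
          have hall : ∀ u ∈ ts, ¬ (pvKey2 x < pvKey2 u) := by
            intro u hu
            have h1 : pvKey2 u ≤ pvKey2 t := hdesc.1 u hu
            have h2 : pvKey2 t ≤ pvKey2 x := by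
              rw [pvKey2, pvKey2, Prod.Lex.toLex_le_toLex]; right; exact ⟨ht, by omega⟩
            exact not_lt.2 (h1.trans h2)
          cases ts with
          | nil => rfl
          | cons u us => simp [hall u (by simp)]
        rw [htwc]
        simp only [List.length_nil]
        rw [if_pos trivial]
        simp only [nbestaScan]
        rw [if_pos ht, if_neg hx]
        rw [ih (j0 + 1) pos0 (fun u hu => hsum u (by simp [hu])) hdesc.2, htwts]
        simp
    · have hPf : ¬(pvKey2 x < pvKey2 t) := by
        rw [pvKey2, pvKey2, Prod.Lex.toLex_lt_toLex]; omega
      have htwc : (t :: ts).takeWhile (fun t => decide (pvKey2 x < pvKey2 t)) = [] := by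
        simp [hPf]
      rw [htwc]
      simp only [List.length_nil]
      rw [if_pos trivial]
      simp only [nbestaScan]
      rw [if_neg ht]

theorem pv_dropWhile_head {α : Type} (p : α → Bool) (l : List α) (h : α) (rest : List α)
    (he : l.dropWhile p = h :: rest) : p h = false := by
  induction l with
  | nil => simp at he
  | cons a l ih =>
    by_cases hp : p a
    · rw [List.dropWhile_cons, if_pos hp] at he; exact ih he
    · rw [List.dropWhile_cons, if_neg hp] at he
      cases he; simpa using hp

theorem pv_take_drop_tw {α : Type} (p : α → Bool) (l : List α) :
    l.take (l.takeWhile p).length = l.takeWhile p ∧ l.drop (l.takeWhile p).length = l.dropWhile p := by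
  induction l with
  | nil => simp
  | cons a l ih =>
    by_cases h : p a <;> simp [h, ih.1, ih.2]

theorem pv_step_insertBy (temp : List (Int × Int × Int)) (x : Int × Int × Int)
    (hpair : temp.Pairwise (fun u v => pvKey2 u ≤ pvKey2 v))
    (hsum : ∀ t ∈ temp, t.1 ≤ x.1) :
    nbestaStep (temp, temp.map (fun t => t.2)) x =
      (PySem.List.insertBy (fun u v => decide (pvKey2 u < pvKey2 v)) x temp,
       (PySem.List.insertBy (fun u v => decide (pvKey2 u < pvKey2 v)) x temp).map (fun t => t.2)) := by
  have htw : temp.takeWhile (fun t => !decide (pvKey2 x < pvKey2 t)) ++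
      temp.dropWhile (fun t => !decide (pvKey2 x < pvKey2 t)) = temp := List.takeWhile_append_dropWhile
  have hu_not : ∀ t ∈ temp.takeWhile (fun t => !decide (pvKey2 x < pvKey2 t)), ¬ (pvKey2 x < pvKey2 t) := by
    intro t htm
    have := List.mem_takeWhile_imp htm
    simpa using this
  have hw_all : ∀ t ∈ temp.dropWhile (fun t => !decide (pvKey2 x < pvKey2 t)), pvKey2 x < pvKey2 t := by
    cases hwe : temp.dropWhile (fun t => !decide (pvKey2 x < pvKey2 t)) with
    | nil => simp
    | cons hd rest =>
      have hhd : pvKey2 x < pvKey2 hd := by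
        have h0 := pv_dropWhile_head _ temp hd rest hwe
        simpa using h0
      intro t htm
      rcases List.mem_cons.1 htm with rfl | htm'
      · exact hhd
      · have hsub : (hd :: rest).Pairwise (fun u v => pvKey2 u ≤ pvKey2 v) :=
          List.Pairwise.sublist (hwe ▸ List.dropWhile_sublist _ (l := temp)) hpair
        exact lt_of_lt_of_le hhd ((List.pairwise_cons.1 hsub).1 t htm')
  have hsum' : ∀ t ∈ temp.reverse, t.1 ≤ x.1 := fun t ht => hsum t (List.mem_reverse.1 ht)
  have hdesc' : temp.reverse.Pairwise (fun u v => pvKey2 v ≤ pvKey2 u) := by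
    rw [List.pairwise_reverse]; exact hpair
  have hrevtw : temp.reverse.takeWhile (fun t => decide (pvKey2 x < pvKey2 t)) =
      (temp.dropWhile (fun t => !decide (pvKey2 x < pvKey2 t))).reverse := by
    conv_lhs => rw [← htw]
    rw [List.reverse_append, List.takeWhile_append]
    have h1 : (temp.dropWhile (fun t => !decide (pvKey2 x < pvKey2 t))).reverse.takeWhile
        (fun t => decide (pvKey2 x < pvKey2 t)) =
        (temp.dropWhile (fun t => !decide (pvKey2 x < pvKey2 t))).reverse :=
      List.takeWhile_eq_self_iff.2 (by
        intro t ht; simpa using hw_all t (List.mem_reverse.1 ht))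
    have h2 : (temp.takeWhile (fun t => !decide (pvKey2 x < pvKey2 t))).reverse.takeWhile
        (fun t => decide (pvKey2 x < pvKey2 t)) = [] := by
      rw [List.takeWhile_eq_nil_iff]
      intro hl
      have hm := List.get_mem (temp.takeWhile (fun t => !decide (pvKey2 x < pvKey2 t))).reverse ⟨0, hl⟩
      have hn := hu_not _ (List.mem_reverse.1 hm)
      simpa using hn
    rw [h1, if_pos rfl, h2, List.append_nil]
  have hscan : nbestaScan temp.reverse x 1 (temp.length : Int) =
      if (temp.dropWhile (fun t => !decide (pvKey2 x < pvKey2 t))).length = 0 then (temp.length : Int)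
      else -(((temp.dropWhile (fun t => !decide (pvKey2 x < pvKey2 t))).length : Int)) := by
    have h := pv_scan_spec x temp.reverse 0 (temp.length : Int) hsum' hdesc'
    rw [hrevtw, List.length_reverse] at h
    simpa using h
  have hcle : (temp.dropWhile (fun t => !decide (pvKey2 x < pvKey2 t))).length ≤ temp.length :=
    List.Sublist.length_le (List.dropWhile_sublist _)
  have hulen : (temp.takeWhile (fun t => !decide (pvKey2 x < pvKey2 t))).length +
      (temp.dropWhile (fun t => !decide (pvKey2 x < pvKey2 t))).length = temp.length := by
    conv_rhs => rw [← htw]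
    rw [List.length_append]
  rw [pv_insertBy_eq]
  simp only [nbestaStep]
  rw [hscan]
  by_cases h0 : (temp.dropWhile (fun t => !decide (pvKey2 x < pvKey2 t))).length = 0
  · have hw0 : temp.dropWhile (fun t => !decide (pvKey2 x < pvKey2 t)) = [] :=
      List.length_eq_zero_iff.1 h0
    have hu0 : temp.takeWhile (fun t => !decide (pvKey2 x < pvKey2 t)) = temp := by
      conv_rhs => rw [← htw]; rw [hw0, List.append_nil]
    rw [if_pos h0, if_pos rfl]
    simp [hu0, hw0]
  · rw [if_neg h0]
    rw [if_neg (by omega :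
      ¬(-(((temp.dropWhile (fun t => !decide (pvKey2 x < pvKey2 t))).length : Nat) : Int) = (temp.length : Int)))]
    rw [pv_insert_neg temp _ x (Nat.pos_of_ne_zero h0) hcle]
    rw [pv_insert_neg (temp.map (fun t => t.2)) _ x.2 (Nat.pos_of_ne_zero h0)
      (by rw [List.length_map]; exact hcle)]
    have htke : temp.length - (temp.dropWhile (fun t => !decide (pvKey2 x < pvKey2 t))).length =
        (temp.takeWhile (fun t => !decide (pvKey2 x < pvKey2 t))).length := by omega
    rw [List.length_map, htke]
    rw [(pv_take_drop_tw (fun t => !decide (pvKey2 x < pvKey2 t)) temp).1,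
        (pv_take_drop_tw (fun t => !decide (pvKey2 x < pvKey2 t)) temp).2]
    rw [← List.map_take, ← List.map_drop,
        (pv_take_drop_tw (fun t => !decide (pvKey2 x < pvKey2 t)) temp).1,
        (pv_take_drop_tw (fun t => !decide (pvKey2 x < pvKey2 t)) temp).2]
    simp

theorem pv_fold_eq (xs : List (Int × Int × Int))
    (h : xs.Pairwise (fun u v => pvKey3 u ≤ pvKey3 v)) :
    xs.foldl nbestaStep ([], []) =
      (PySem.List.sorted xs pvKey2 false, (PySem.List.sorted xs pvKey2 false).map (fun t => t.2)) := by
  induction xs using List.reverseRecOn with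
  | nil => rfl
  | append_singleton xs x ih =>
    rw [List.pairwise_append] at h
    obtain ⟨h1, -, h3⟩ := h
    rw [List.foldl_append, ih h1]
    simp only [List.foldl_cons, List.foldl_nil]
    have hs : PySem.List.sorted (xs ++ [x]) pvKey2 false =
        PySem.List.insertBy (fun u v => decide (pvKey2 u < pvKey2 v)) x
          (PySem.List.sorted xs pvKey2 false) := by
      rw [PySem.List.sorted_eq_foldl_insertBy, PySem.List.sorted_eq_foldl_insertBy,
        List.foldl_append]
      simp
    rw [hs]
    exact pv_step_insertBy _ x (PySem.List.sorted_pairwise xs pvKey2)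
      (fun t ht => pv_key3_le_sum t x (h3 t ((PySem.List.mem_sorted xs pvKey2 false t).1 ht) x (by simp)))

-- ===== VERDICT (by name: the statement is the Claim_ definition above) =====
theorem nbesta_spec : Claim_equal_nbesta := by
  intro a b _ hpre
  unfold Spec_nbesta
  simp only [nbesta, nbesta_alt]
  have hinner : (fun (ps : List (Int × Int × Int)) (i : Int) =>
      List.foldl (fun ps j => ps ++ [(i + j, (i, j))]) ps b) =
      fun ps i => ps ++ b.map (fun j => (i + j, (i, j))) := by
    funext ps i
    exact PySem.List.foldl_append_singleton_eq_map _ b ps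
  rw [hinner, PySem.List.foldl_append_eq_flatMap, List.nil_append]
  have hsp_len : a.length ≤
      (PySem.List.sorted (a.flatMap (fun i => b.map (fun j => (i + j, (i, j))))) pvKey3 false).length := by
    rw [PySem.List.length_sorted, List.length_flatMap]
    have h1 : ∀ L' : List Int,
        (L'.map fun i => (b.map (fun j => (i + j, (i, j)))).length).sum = L'.length * b.length := by
      intro L'
      induction L' with
      | nil => simp
      | cons i L _ => simp [Nat.succ_mul, Nat.add_comm]
    rw [h1]
    rcases hpre with rfl | hb
    · simp
    · have : 0 < b.length := List.length_pos_iff.2 hb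
      exact Nat.le_mul_of_pos_right a.length this
  have hcongr : ∀ (acc : List (Int × Int × Int) × List (Int × Int)),
      ∀ j ∈ PySem.List.pyRange 0 (a.length : Int) 1,
      nbestaStep acc (PySem.List.pyGetD
        (PySem.List.sorted (a.flatMap (fun i => b.map (fun j => (i + j, (i, j))))) pvKey3 false) j (0, (0, 0))) =
      nbestaStep acc (PySem.List.pyGetD
        ((PySem.List.sorted (a.flatMap (fun i => b.map (fun j => (i + j, (i, j))))) pvKey3 false).take a.length) j (0, (0, 0))) := by
    intro acc j hj
    rw [PySem.List.mem_pyRange_one] at hj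
    obtain ⟨hj0, hj1⟩ := hj
    lift j to Nat using hj0 with k
    have hk : k < a.length := by exact_mod_cast hj1
    rw [PySem.List.pyGetD_natCast, PySem.List.pyGetD_natCast,
      List.getD_eq_getElem?_getD, List.getD_eq_getElem?_getD, List.getElem?_take, if_pos hk]
  rw [PySem.List.foldl_congr_mem _ _ _ _ hcongr]
  have hlen2 : ((a.length : Nat) : Int) =
      (((PySem.List.sorted (a.flatMap (fun i => b.map (fun j => (i + j, (i, j))))) pvKey3 false).take a.length).length : Int) := by
    rw [List.length_take, min_eq_left hsp_len]
  rw [hlen2, PySem.List.foldl_pyRange_zero_pyGetD']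
  rw [pv_fold_eq _ (List.Pairwise.sublist (List.take_sublist _ _)
    (PySem.List.sorted_pairwise _ pvKey3))]
  rw [pv_sorted2_eq]
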